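-- pv_equiv track=rewrite | github.com/kctoombs/CS8 | lab03/lab03.py | countEvens
-- ===== SOURCE A (Python) =====
-- def countEvens(listOfInts):
--     """
--     given a list of ints, counts even ints in list.  Otherwise, returns False.
--
--     yields 0 for empty list, or list of ints with no evens in it.
--
--
--     >>> countEvens('1')
--     False
--     >>> countEvens(['a','b'])
--     False
--     >>> countEvens([])
--     0
--     >>> countEvens([1,2,3,4,5])
--     2
--     >>> countEvens([1])
--     0
--     >>> countEvens([3,2])
--     1
--     >>> countEvens([2,3,4])
--     2
--     >>>
--
--     """
--     acc = 0
--
--     if type(listOfInts) != list: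
--        return False
--
--     for i in listOfInts:
--        if type(i) != int:
--           return False
--        if i%2 == 0:
--           acc = acc + 1
--
--     return acc
-- ===== SOURCE B (Python) =====
-- def countEvens(listOfInts):
--     # Validation pass first, then a separate counting pass.
--     if type(listOfInts) != list:
--         return False
--     if not all(type(i) == int for i in listOfInts):
--         return False
--     return sum(1 for i in listOfInts if i % 2 == 0)
-- ===== Notes on version B (the rewrite author's own statement) =====
-- stated objective: simpler
-- what changed: Replaces A's single interleaved validate-and-count loop with two distinct passes: an all() validation pass followed by a sum() generator counting the evens.
import Mathlib
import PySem

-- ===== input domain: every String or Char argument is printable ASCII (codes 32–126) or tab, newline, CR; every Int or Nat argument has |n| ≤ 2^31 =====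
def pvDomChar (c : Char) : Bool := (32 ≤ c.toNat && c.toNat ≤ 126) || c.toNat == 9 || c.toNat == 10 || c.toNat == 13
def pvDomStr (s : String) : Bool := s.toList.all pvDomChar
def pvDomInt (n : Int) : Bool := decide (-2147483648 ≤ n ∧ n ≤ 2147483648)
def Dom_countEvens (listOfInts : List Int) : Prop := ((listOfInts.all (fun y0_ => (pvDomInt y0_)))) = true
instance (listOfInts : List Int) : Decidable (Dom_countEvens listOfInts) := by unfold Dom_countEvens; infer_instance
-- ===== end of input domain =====

-- B splits A's interleaved validate-and-count loop into a validation pass plus a counting pass (simpler decomposition); on List Int the type checks always pass.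


-- ===== PORT A =====
-- A: one loop carrying an accumulator, incremented when i % 2 == 0 (Python mod).
def countEvens (listOfInts : List Int) : Int :=
  listOfInts.foldl (fun acc i => if PySem.Int.mod i 2 = 0 then acc + 1 else acc) 0

-- ===== PORT B =====
-- B: validation pass is vacuous on List Int; counting pass = length of the filtered list.
def countEvens_alt (listOfInts : List Int) : Int :=
  ((listOfInts.filter (fun i => PySem.Int.mod i 2 == 0)).length : Int)

-- ===== PRECONDITION & SPEC =====
def Spec_countEvens (listOfInts : List Int) (out : Int) : Prop := out = countEvens_alt listOfInts
instance (listOfInts : List Int) (out : Int) : Decidable (Spec_countEvens listOfInts out) := by unfold Spec_countEvens; infer_instance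

-- ===== CLAIM (what is proved, stated in full; the proofs are below) =====
def Claim_equal_countEvens : Prop := ∀ (listOfInts : List Int), Dom_countEvens listOfInts → Spec_countEvens listOfInts (countEvens listOfInts)

-- ===== LEMMAS AND PROOFS =====
theorem countEvens_foldl_general (l : List Int) (a : Int) :
    l.foldl (fun acc i => if PySem.Int.mod i 2 = 0 then acc + 1 else acc) a
      = a + ((l.filter (fun i => PySem.Int.mod i 2 == 0)).length : Int) := by
  induction l generalizing a with
  | nil => simp [List.foldl, List.filter]
  | cons x xs ih =>
    simp only [List.foldl_cons, List.filter_cons]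
    by_cases h : PySem.Int.mod x 2 = 0
    · have hb : (PySem.Int.mod x 2 == 0) = true := by rw [h]; rfl
      rw [if_pos h, hb, ih]
      simp only [if_true, List.length_cons]
      push_cast; ring
    · have hb : (PySem.Int.mod x 2 == 0) = false := by simpa using h
      rw [if_neg h, hb, ih]
      simp

-- ===== VERDICT (by name: the statement is the Claim_ definition above) =====
theorem countEvens_spec : Claim_equal_countEvens := by
  intro l _
  unfold Spec_countEvens countEvens countEvens_alt
  simpa using countEvens_foldl_general l 0
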